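-- pv_equiv track=rewrite | github.com/bhavsoni/CS115b---Intro-To-Computer-Science | hw8.py | paddingfunc
-- ===== SOURCE A (Python) =====
-- def paddingfunc(N):
--     '''this is a helper functions that pads 0s to the function to make it a 8 bit string'''
--     if len(N) < 8:
--         N = "0" + N
--         return paddingfunc(N)
--         '''if the length of the string is less than 8, then the new string N will keep adding 0s until length of 8'''
--     else:
--         return N
--         '''if length of string is already 8 then return the string'''
-- ===== SOURCE B (Python) =====
-- def paddingfunc(N):
--     '''closed-form left-pad: prepend all needed zeros at once instead of one per recursive call'''
--     if len(N) < 8: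
--         return "0" * (8 - len(N)) + N
--     else:
--         return N
-- ===== Notes on version B (the rewrite author's own statement) =====
-- stated objective: simpler
-- what changed: Replaced the one-zero-per-call recursion with a single closed-form concatenation of the needed number of zero characters in front of N, keeping the length guard so longer strings are returned untouched.
import Mathlib
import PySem

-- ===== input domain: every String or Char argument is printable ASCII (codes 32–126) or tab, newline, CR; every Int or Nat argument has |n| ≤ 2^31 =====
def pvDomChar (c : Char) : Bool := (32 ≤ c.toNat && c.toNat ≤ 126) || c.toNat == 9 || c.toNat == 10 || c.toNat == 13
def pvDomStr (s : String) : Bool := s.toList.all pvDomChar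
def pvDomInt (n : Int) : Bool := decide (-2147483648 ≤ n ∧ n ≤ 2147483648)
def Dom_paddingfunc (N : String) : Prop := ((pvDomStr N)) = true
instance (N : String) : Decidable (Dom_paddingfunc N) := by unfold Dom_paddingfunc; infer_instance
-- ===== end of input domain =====

-- B prepends all needed zeros in one closed-form concatenation instead of one '0' per recursive call (objective: simpler).
-- ===== PORT A =====
def paddingfunc (N : String) : String :=
  if PySem.Str.len N < 8 then
    paddingfunc (String.ofList ('0' :: N.toList))     -- N = "0" + N; recursive call
  else
    N
termination_by (8 - N.toList.length : Nat)
decreasing_by simp_all [PySem.Str.len_eq]; omega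

-- ===== PORT B =====
def paddingfunc_alt (N : String) : String :=
  if PySem.Str.len N < 8 then
    String.ofList (List.replicate (8 - PySem.Str.len N).toNat '0' ++ N.toList)  -- "0"*(8-len(N)) + N
  else
    N

-- ===== PRECONDITION & SPEC =====
def Spec_paddingfunc (N : String) (out : String) : Prop := out = paddingfunc_alt N
instance (N : String) (out : String) : Decidable (Spec_paddingfunc N out) := by unfold Spec_paddingfunc; infer_instance

-- ===== CLAIM (what is proved, stated in full; the proofs are below) =====
def Claim_equal_paddingfunc : Prop := ∀ (N : String), Dom_paddingfunc N → Spec_paddingfunc N (paddingfunc N)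

-- ===== LEMMAS AND PROOFS =====
theorem paddingfunc_eq_alt (N : String) : paddingfunc N = paddingfunc_alt N := by
  fun_induction paddingfunc N with
  | case1 N hlt ih =>
    rw [ih]
    have hlen : N.toList.length < 8 := by
      simpa [PySem.Str.len_eq] using hlt
    simp only [paddingfunc_alt, PySem.Str.len_eq, String.toList_ofList]
    by_cases h7 : N.toList.length = 7
    · simp [h7]
    · have : N.toList.length < 7 := by omega
      rw [if_pos (by simp only [List.length_cons]; omega), if_pos (by omega)]
      congr 1
      have h1 : ((8 : Int) - ((('0' :: N.toList).length : Nat) : Int)).toNat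
          = 7 - N.toList.length := by simp; omega
      have h2 : ((8 : Int) - ((N.toList.length : Nat) : Int)).toNat
          = 8 - N.toList.length := by omega
      rw [h1, h2]
      have : 8 - N.toList.length = (7 - N.toList.length) + 1 := by omega
      rw [this, List.replicate_succ']
      simp
  | case2 N hge =>
    rw [paddingfunc_alt, if_neg hge]

-- ===== VERDICT (by name: the statement is the Claim_ definition above) =====
theorem paddingfunc_spec : Claim_equal_paddingfunc := by
  intro N _
  unfold Spec_paddingfunc
  exact paddingfunc_eq_alt N
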